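-- pv_equiv track=rewrite | github.com/AriB18/ai-interview-detector | src/audio_analyzer.py | _detect_pauses
-- ===== SOURCE A (Python) =====
-- def _detect_pauses(is_speech):
--     """Detect pause segments in audio"""
--     pauses = []
--     in_pause = False
--     pause_start = 0
--
--     for i, speaking in enumerate(is_speech):
--         if not speaking and not in_pause:
--             pause_start = i
--             in_pause = True
--         elif speaking and in_pause:
--             pauses.append((pause_start, i))
--             in_pause = False
--
--     return pauses
-- ===== SOURCE B (Python) =====
-- from itertools import groupby
--
--
-- def _detect_pauses(is_speech):
--     """Detect pause segments in audio"""
--     # Build maximal runs (value, start, end), then keep every non-speech run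
--     # except the final run (a trailing pause never gets closed).
--     runs = []
--     pos = 0
--     for value, group in groupby(is_speech, key=bool):
--         n = sum(1 for _ in group)
--         runs.append((value, pos, pos + n))
--         pos += n
--     return [(start, end) for value, start, end in runs[:-1] if not value]
-- ===== Notes on version B (the rewrite author's own statement) =====
-- stated objective: alternative
-- what changed: Replaces A's single-pass in_pause state machine with a groupby-style decomposition: build the maximal runs as (value, start, end), then keep (start, end) of every non-speech run except the final run.
import Mathlib
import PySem

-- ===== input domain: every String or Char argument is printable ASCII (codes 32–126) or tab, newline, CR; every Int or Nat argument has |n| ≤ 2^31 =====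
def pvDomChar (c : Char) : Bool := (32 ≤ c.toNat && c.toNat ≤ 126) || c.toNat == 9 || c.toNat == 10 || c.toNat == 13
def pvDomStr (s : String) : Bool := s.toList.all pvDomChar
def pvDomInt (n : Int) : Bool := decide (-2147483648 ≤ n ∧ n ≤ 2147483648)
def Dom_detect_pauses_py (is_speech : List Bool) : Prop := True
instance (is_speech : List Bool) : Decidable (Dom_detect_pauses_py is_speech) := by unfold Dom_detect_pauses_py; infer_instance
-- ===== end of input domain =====

-- B replaces A's in_pause state machine by building the maximal runs and filtering the
-- non-final non-speech runs (objective: alternative decomposition, same cost).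

-- ===== PORT A =====
-- one step of A's for-loop: state = (pauses, in_pause, pause_start)
def stepA (st : List (Int × Int) × Bool × Int) (p : Int × Bool) : List (Int × Int) × Bool × Int :=
  if !p.2 && !st.2.1 then (st.1, true, p.1)
  else if p.2 && st.2.1 then (st.1 ++ [(st.2.2, p.1)], false, st.2.2)
  else st

def detect_pauses_py (is_speech : List Bool) : List (Int × Int) :=
  ((PySem.List.enumerate is_speech).foldl stepA ([], false, 0)).1

-- ===== PORT B =====
-- takeRun b t = (length of leading run of b's in t, rest)   (the rest of one groupby group)
def takeRun (b : Bool) : List Bool → Nat × List Bool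
  | [] => (0, [])
  | c :: t => if c == b then ((takeRun b t).1 + 1, (takeRun b t).2) else (0, c :: t)

theorem takeRun_length (b : Bool) : ∀ t : List Bool, ((takeRun b t).2).length ≤ t.length := by
  intro t; induction t with
  | nil => simp [takeRun]
  | cons c t ih => by_cases h : c = b <;> simp [takeRun, h] <;> omega

-- the groupby loop of Source B: maximal runs as (value, start, end)
def runsAux (i : Int) : List Bool → List (Bool × Int × Int)
  | [] => []
  | b :: t =>
      (b, i, i + 1 + ((takeRun b t).1 : Int)) ::
        runsAux (i + 1 + ((takeRun b t).1 : Int)) (takeRun b t).2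
  termination_by l => l.length
  decreasing_by exact Nat.lt_succ_of_le (takeRun_length b t)

-- the final comprehension of Source B: runs[:-1], keep non-speech runs
def detect_pauses_py_alt (is_speech : List Bool) : List (Int × Int) :=
  ((runsAux 0 is_speech).dropLast).filterMap (fun r => if r.1 then none else some (r.2.1, r.2.2))

-- ===== PRECONDITION & SPEC =====
def Spec_detect_pauses_py (is_speech : List Bool) (out : List (Int × Int)) : Prop := out = detect_pauses_py_alt is_speech
instance (is_speech : List Bool) (out : List (Int × Int)) : Decidable (Spec_detect_pauses_py is_speech out) := by unfold Spec_detect_pauses_py; infer_instance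

-- ===== CLAIM (what is proved, stated in full; the proofs are below) =====
def Claim_equal_detect_pauses_py : Prop := ∀ (is_speech : List Bool), Dom_detect_pauses_py is_speech → Spec_detect_pauses_py is_speech (detect_pauses_py is_speech)

-- ===== LEMMAS AND PROOFS =====

-- common characterisation: pauses emitted while outside / inside a pause
mutual
def goOut (i : Int) : List Bool → List (Int × Int)
  | [] => []
  | b :: t => if b then goOut (i + 1) t else goIn i (i + 1) t
def goIn (s i : Int) : List Bool → List (Int × Int)
  | [] => []
  | b :: t => if b then (s, i) :: goOut (i + 1) t else goIn s (i + 1) t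
end

def pick : List (Bool × Int × Int) → List (Int × Int)
  | [] => []
  | [_] => []
  | r :: s :: rest => if r.1 then pick (s :: rest) else (r.2.1, r.2.2) :: pick (s :: rest)

theorem filterMap_dropLast_eq_pick : ∀ rs : List (Bool × Int × Int),
    (rs.dropLast).filterMap (fun r => if r.1 then none else some (r.2.1, r.2.2)) = pick rs := by
  intro rs
  induction rs with
  | nil => simp [pick]
  | cons r rest ih =>
    cases rest with
    | nil => simp [pick]
    | cons s rest' =>
      by_cases h : r.1 <;> simp [pick, h, ← ih]

theorem takeRun_head (b : Bool) : ∀ t : List Bool,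
    (takeRun b t).2 = [] ∨ ∃ r', (takeRun b t).2 = (!b) :: r' := by
  intro t; induction t with
  | nil => simp [takeRun]
  | cons c t ih =>
    by_cases h : c = b
    · simpa [takeRun, h] using ih
    · right
      refine ⟨t, ?_⟩
      have hc : c = !b := by cases b <;> cases c <;> simp_all
      simp [takeRun, hc]

theorem skip_true : ∀ (t : List Bool) (i : Int),
    goOut i t = goOut (i + ((takeRun true t).1 : Int)) (takeRun true t).2 := by
  intro t; induction t with
  | nil => simp [takeRun]
  | cons c t ih =>
    intro i
    cases c with
    | true =>
      have := ih (i + 1)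
      simp only [takeRun, goOut, if_true, beq_self_eq_true, if_pos, this]
      congr 1
      push_cast
      ring
    | false => simp [takeRun, goOut]

theorem skip_false : ∀ (t : List Bool) (s i : Int),
    goIn s i t = goIn s (i + ((takeRun false t).1 : Int)) (takeRun false t).2 := by
  intro t; induction t with
  | nil => simp [takeRun]
  | cons c t ih =>
    intro s i
    cases c with
    | false =>
      have := ih s (i + 1)
      simp only [takeRun, goIn, if_neg, Bool.false_eq_true, not_false_iff, beq_self_eq_true,
        if_pos, this]
      congr 1
      push_cast
      ring
    | true => simp [takeRun, goIn]

theorem pick_cons_true (x y : Int) (rs : List (Bool × Int × Int)) (h : rs ≠ []) :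
    pick ((true, x, y) :: rs) = pick rs := by
  cases rs with
  | nil => exact absurd rfl h
  | cons c cs => simp [pick]

theorem pick_cons_false (x y : Int) (rs : List (Bool × Int × Int)) (h : rs ≠ []) :
    pick ((false, x, y) :: rs) = (x, y) :: pick rs := by
  cases rs with
  | nil => exact absurd rfl h
  | cons c cs => simp [pick]

theorem runsAux_ne_nil (j : Int) (c : Bool) (cs : List Bool) : runsAux j (c :: cs) ≠ [] := by
  rw [runsAux]; simp

theorem pick_runsAux : ∀ (n : Nat) (l : List Bool), l.length ≤ n → ∀ i : Int,
    pick (runsAux i l) = goOut i l := by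
  intro n
  induction n with
  | zero =>
    intro l hl i
    have : l = [] := List.eq_nil_of_length_eq_zero (Nat.le_zero.mp hl)
    subst this; simp [runsAux, pick, goOut]
  | succ n ih =>
    intro l hl i
    cases l with
    | nil => simp [runsAux, pick, goOut]
    | cons b t =>
      have ht : t.length ≤ n := by simpa using hl
      have hr : ((takeRun b t).2).length ≤ n := le_trans (takeRun_length b t) ht
      cases b with
      | true =>
        rcases takeRun_head true t with h | ⟨r', h⟩
        · -- rest is all speech: no further runs, both sides are []
          rw [runsAux, h, runsAux]
          have h2 : goOut i (true :: t) = goOut (i + 1) t := by simp [goOut]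
          rw [h2, skip_true t (i + 1), h]
          simp [pick, goOut]
        · have h' : (takeRun true t).2 = false :: r' := by simpa using h
          rw [runsAux, pick_cons_true _ _ _ (by rw [h']; exact runsAux_ne_nil _ _ _)]
          rw [ih _ hr]
          have h2 : goOut i (true :: t) = goOut (i + 1) t := by simp [goOut]
          rw [h2, skip_true t (i + 1)]
      | false =>
        rcases takeRun_head false t with h | ⟨r', h⟩
        · -- trailing pause: never closed by A, final run dropped by B
          rw [runsAux, h, runsAux]
          have h2 : goOut i (false :: t) = goIn i (i + 1) t := by simp [goOut]
          rw [h2, skip_false t i (i + 1), h]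
          simp [pick, goIn]
        · have h' : (takeRun false t).2 = true :: r' := by simpa using h
          rw [runsAux, pick_cons_false _ _ _ (by rw [h']; exact runsAux_ne_nil _ _ _)]
          rw [ih _ hr]
          have h2 : goOut i (false :: t) = goIn i (i + 1) t := by simp [goOut]
          rw [h2, skip_false t i (i + 1), h']
          have h3 : i + 1 + ((takeRun false t).1 : Int) = i + (1 + ((takeRun false t).1 : Int)) := by ring
          simp [goIn, goOut, h3]

theorem foldA_spec : ∀ (l : List Bool) (i : Int) (acc : List (Int × Int)),
    (∀ ps : Int, ((PySem.List.enumerate l i).foldl stepA (acc, false, ps)).1 = acc ++ goOut i l)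
    ∧ (∀ s : Int, ((PySem.List.enumerate l i).foldl stepA (acc, true, s)).1 = acc ++ goIn s i l) := by
  intro l
  induction l with
  | nil => intro i acc; simp [PySem.List.enumerate_nil, goOut, goIn]
  | cons b t ih =>
    intro i acc
    constructor
    · intro ps
      cases b with
      | true =>
        rw [PySem.List.enumerate_cons, List.foldl_cons,
          show stepA (acc, false, ps) (i, true) = (acc, false, ps) from by simp [stepA]]
        rw [(ih (i + 1) acc).1 ps]
        simp [goOut]
      | false =>
        rw [PySem.List.enumerate_cons, List.foldl_cons,
          show stepA (acc, false, ps) (i, false) = (acc, true, i) from by simp [stepA]]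
        rw [(ih (i + 1) acc).2 i]
        simp [goOut]
    · intro s
      cases b with
      | true =>
        rw [PySem.List.enumerate_cons, List.foldl_cons,
          show stepA (acc, true, s) (i, true) = (acc ++ [(s, i)], false, s) from by simp [stepA]]
        rw [(ih (i + 1) (acc ++ [(s, i)])).1 s]
        simp [goIn]
      | false =>
        rw [PySem.List.enumerate_cons, List.foldl_cons,
          show stepA (acc, true, s) (i, false) = (acc, true, s) from by simp [stepA]]
        rw [(ih (i + 1) acc).2 s]
        simp [goIn]

-- ===== VERDICT (by name: the statement is the Claim_ definition above) =====
theorem detect_pauses_py_spec : Claim_equal_detect_pauses_py := by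
  intro l _
  unfold Spec_detect_pauses_py detect_pauses_py detect_pauses_py_alt
  rw [filterMap_dropLast_eq_pick, pick_runsAux l.length l le_rfl 0]
  simpa using (foldA_spec l 0 []).1 0
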